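-- pv_equiv track=rewrite | github.com/staanvx/PDS | app/main.py | is_visual_homograph_of_terms
-- ===== SOURCE A (Python) =====
-- ASCII_VISUAL_REPLACEMENTS = [
--     ("rn", "m"),
--     ("vv", "w"),
--     ("cl", "d"),
--     ("0", "o"),
--     ("1", "l"),
--     ("3", "e"),
--     ("5", "s"),
-- ]
--
-- def levenshtein_distance(s1: str, s2: str) -> int:
--     if len(s1) < len(s2):
--         return levenshtein_distance(s2, s1)
--
--     if len(s2) == 0:
--         return len(s1)
--
--     previous_row = list(range(len(s2) + 1))
--     for i, c1 in enumerate(s1):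
--         current_row = [i + 1]
--         for j, c2 in enumerate(s2):
--             insertions = previous_row[j + 1] + 1
--             deletions = current_row[j] + 1
--             substitutions = previous_row[j] + (c1 != c2)
--             current_row.append(min(insertions, deletions, substitutions))
--         previous_row = current_row
--
--     return previous_row[-1]
--
-- def get_domain_base(domain: str) -> str:
--     return domain.split(".")[0].lower() if "." in domain else domain.lower()
--
-- def get_domain_tokens(domain: str) -> list[str]:
--     base = get_domain_base(domain)
--     return [token for token in base.split("-") if token]
--
-- def normalize_visual_homographs(text: str) -> str:
--     normalized = text.lower()
--     for src, dst in ASCII_VISUAL_REPLACEMENTS: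
--         normalized = normalized.replace(src, dst)
--     return normalized
--
-- def is_visual_homograph_of_terms(domain: str, terms: list[str]) -> bool:
--     tokens = get_domain_tokens(domain)
--
--     for token in tokens:
--         normalized = normalize_visual_homographs(token)
--         for term in terms:
--             term_lower = term.lower()
--
--             if token == term_lower:
--                 continue
--
--             if normalized == term_lower:
--                 return True
--
--             if levenshtein_distance(normalized, term_lower) <= 1:
--                 return True
--
--     return False
-- ===== SOURCE B (Python) =====
-- ASCII_VISUAL_REPLACEMENTS = [
--     ("rn", "m"),
--     ("vv", "w"),
--     ("cl", "d"),
--     ("0", "o"),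
--     ("1", "l"),
--     ("3", "e"),
--     ("5", "s"),
-- ]
--
-- def _edit_within_one(s: str, t: str) -> bool:
--     # linear scan: skip the common prefix, then the remainders must match
--     # after skipping at most one character (substitution / insertion / deletion)
--     i = 0
--     n = min(len(s), len(t))
--     while i < n and s[i] == t[i]:
--         i += 1
--     if i == len(s):
--         return len(t) - i <= 1
--     if i == len(t):
--         return len(s) - i <= 1
--     return s[i + 1:] == t[i + 1:] or s[i:] == t[i + 1:] or s[i + 1:] == t[i:]
--
-- def is_visual_homograph_of_terms(domain: str, terms: list[str]) -> bool:
--     base = domain.split(".")[0].lower() if "." in domain else domain.lower()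
--     terms_lower = [term.lower() for term in terms]
--     for token in base.split("-"):
--         if not token:
--             continue
--         normalized = token.lower()
--         for src, dst in ASCII_VISUAL_REPLACEMENTS:
--             normalized = normalized.replace(src, dst)
--         for term_lower in terms_lower:
--             if token != term_lower and _edit_within_one(normalized, term_lower):
--                 return True
--     return False
-- ===== Notes on version B (the rewrite author's own statement) =====
-- stated objective: faster
-- what changed: The full O(L^2) Levenshtein DP used only to test 'distance <= 1' is replaced by a linear scan that skips the common prefix and compares the remainders with at most one skipped character; the lowercased terms are computed once instead of per token, and A's equality/distance branches are merged into one guarded test.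
import Mathlib
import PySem

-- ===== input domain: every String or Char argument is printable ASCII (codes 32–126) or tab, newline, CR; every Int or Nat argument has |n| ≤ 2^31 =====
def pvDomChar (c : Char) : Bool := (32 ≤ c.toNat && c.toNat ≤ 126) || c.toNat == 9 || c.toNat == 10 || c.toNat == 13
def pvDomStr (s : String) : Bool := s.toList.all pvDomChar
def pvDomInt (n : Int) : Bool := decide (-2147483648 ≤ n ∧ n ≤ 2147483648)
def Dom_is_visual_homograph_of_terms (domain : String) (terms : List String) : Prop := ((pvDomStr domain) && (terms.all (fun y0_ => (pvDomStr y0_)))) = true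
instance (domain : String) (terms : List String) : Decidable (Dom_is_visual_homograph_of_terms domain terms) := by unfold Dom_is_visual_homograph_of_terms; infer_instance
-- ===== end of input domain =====

-- B replaces A's full O(L^2) Levenshtein DP per (token, term) pair by a linear
-- edit-distance-≤-1 scan (common prefix, then compare remainders with one skip),
-- hoists the lowercasing of the terms out of the token loop, and merges A's
-- three-branch comparison into one guarded test.

-- B replaces A's full quadratic Levenshtein DP per (token, term) pair by a
-- linear edit-distance-at-most-1 scan (skip the common prefix, then compare the
-- remainders with one skip), hoists the lowercasing of the terms out of the
-- token loop, and merges A's three-branch comparison into one guarded test.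

-- ===== PORT A =====
def pvRepl : List (String × String) :=
  [("rn","m"),("vv","w"),("cl","d"),("0","o"),("1","l"),("3","e"),("5","s")]

-- levenshtein_distance; the row values are Python ints that are always >= 0,
-- kept as Nat; every list index taken is in range, so getD is exact there
def pyLev (s1 s2 : List Char) : Nat :=
  if s1.length < s2.length then pyLev s2 s1
  else if s2.length = 0 then s1.length
  else
    let prev :=
      s1.zipIdx.foldl
        (fun prev ci =>
          s2.zipIdx.foldl
            (fun curr cj =>
              let ins := prev.getD (cj.2 + 1) 0 + 1
              let dels := curr.getD cj.2 0 + 1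
              let subs := prev.getD cj.2 0 + (if ci.1 ≠ cj.1 then 1 else 0)
              curr ++ [min ins (min dels subs)])
            [ci.2 + 1])
        (List.range (s2.length + 1))
    prev.getD (prev.length - 1) 0
termination_by s2.length

def getDomainBase (domain : String) : String :=
  if PySem.Str.isIn "." domain then
    PySem.Str.lower (((PySem.Str.split? domain ".").getD []).getD 0 "")
  else PySem.Str.lower domain

def getDomainTokens (domain : String) : List String :=
  ((PySem.Str.split? (getDomainBase domain) "-").getD []).filter (fun t => !(t == ""))

def normalizeVisual (text : String) : String :=
  pvRepl.foldl (fun s p => PySem.Str.replace s p.1 p.2) (PySem.Str.lower text)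

def is_visual_homograph_of_terms (domain : String) (terms : List String) : Bool :=
  (getDomainTokens domain).any (fun token =>
    let normalized := normalizeVisual token
    terms.any (fun term =>
      let tl := PySem.Str.lower term
      if token = tl then false
      else if normalized = tl then true
      else decide (pyLev normalized.toList tl.toList ≤ 1)))

-- ===== PORT B =====
-- _edit_within_one: the while loop over the common prefix is the structural
-- recursion; at the first mismatch the three slice comparisons remain
def edLe1 : List Char → List Char → Bool
  | [], t => decide (t.length ≤ 1)
  | _ :: s, [] => decide (s.length + 1 ≤ 1)
  | a :: s, b :: t =>
    if a = b then edLe1 s t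
    else (s == t) || ((a :: s) == t) || (s == (b :: t))

def is_visual_homograph_of_terms_alt (domain : String) (terms : List String) : Bool :=
  let base := if PySem.Str.isIn "." domain then
      PySem.Str.lower (((PySem.Str.split? domain ".").getD []).getD 0 "")
    else PySem.Str.lower domain
  let termsLower := terms.map (fun term => PySem.Str.lower term)
  ((PySem.Str.split? base "-").getD []).any (fun token =>
    if token == "" then false
    else
      let normalized := pvRepl.foldl (fun s p => PySem.Str.replace s p.1 p.2) (PySem.Str.lower token)
      termsLower.any (fun tl => !(token == tl) && edLe1 normalized.toList tl.toList))

-- ===== PRECONDITION & SPEC =====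
def Spec_is_visual_homograph_of_terms (domain : String) (terms : List String) (out : Bool) : Prop := out = is_visual_homograph_of_terms_alt domain terms
instance (domain : String) (terms : List String) (out : Bool) : Decidable (Spec_is_visual_homograph_of_terms domain terms out) := by unfold Spec_is_visual_homograph_of_terms; infer_instance

-- ===== CLAIM (what is proved, stated in full; the proofs are below) =====
def Claim_equal_is_visual_homograph_of_terms : Prop := ∀ (domain : String) (terms : List String), Dom_is_visual_homograph_of_terms domain terms → Spec_is_visual_homograph_of_terms domain terms (is_visual_homograph_of_terms domain terms)

-- ===== LEMMAS AND PROOFS =====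

-- reference edit distance, recursive on the first characters
def levr : List Char → List Char → Nat
  | [], v => v.length
  | _ :: u, [] => u.length + 1
  | a :: u, b :: v =>
    min (levr u (b :: v) + 1) (min (levr (a :: u) v + 1) (levr u v + (if a ≠ b then 1 else 0)))
termination_by u v => u.length + v.length

theorem levr_eq_zero (u v : List Char) : levr u v = 0 ↔ u = v := by
  induction u, v using levr.induct with
  | case1 v => simp [levr]
  | case2 a u => simp [levr]
  | case3 a u b v ih1 ih2 ih3 =>
    by_cases hab : a = b <;> simp [levr, hab, ih3]

theorem edLe1_cons_self (a : Char) (v : List Char) : edLe1 (a :: v) v = true := by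
  induction v generalizing a with
  | nil => simp [edLe1]
  | cons b v ih => by_cases hab : a = b <;> simp [edLe1, hab, ih]

theorem edLe1_self_cons (a : Char) (v : List Char) : edLe1 v (a :: v) = true := by
  induction v generalizing a with
  | nil => simp [edLe1]
  | cons b v ih => by_cases hab : a = b <;> simp [edLe1, hab, ih]

theorem led (u v : List Char) : levr u v ≤ 1 ↔ edLe1 u v = true := by
  induction u, v using edLe1.induct with
  | case1 t => simp [levr, edLe1]
  | case2 a s => simp [levr, edLe1]
  | case3 s b t ih =>
    simp only [edLe1]
    constructor
    · intro h
      simp only [levr, ne_eq, not_true_eq_false, if_false, Nat.add_zero] at h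
      by_cases h3 : levr s t ≤ 1
      · exact ih.mp h3
      · have h0 : levr s (b :: t) = 0 ∨ levr (b :: s) t = 0 := by omega
        rcases h0 with h0 | h0
        · rw [(levr_eq_zero _ _).mp h0]; exact edLe1_cons_self b t
        · rw [← (levr_eq_zero _ _).mp h0]; exact edLe1_self_cons b s
    · intro h
      have := ih.mpr h
      simp only [levr, ne_eq, not_true_eq_false, if_false, Nat.add_zero]
      omega
  | case4 a s b t hab =>
    have h1 := levr_eq_zero s (b :: t)
    have h2 := levr_eq_zero (a :: s) t
    have h3 := levr_eq_zero s t
    have hb : edLe1 (a :: s) (b :: t) = ((s == t) || ((a :: s) == t) || (s == (b :: t))) := by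
      simp [edLe1, hab]
    have hl : levr (a :: s) (b :: t)
        = min (levr s (b :: t) + 1) (min (levr (a :: s) t + 1) (levr s t + 1)) := by
      simp [levr, hab]
    rw [hb, hl]
    simp only [Bool.or_eq_true, beq_iff_eq]
    constructor
    · intro h
      have h0 : levr s (b :: t) = 0 ∨ levr (a :: s) t = 0 ∨ levr s t = 0 := by omega
      rcases h0 with h0 | h0 | h0
      · exact Or.inr (h1.mp h0)
      · exact Or.inl (Or.inr (h2.mp h0))
      · exact Or.inl (Or.inl (h3.mp h0))
    · intro h
      rcases h with (h | h) | h
      · have := h3.mpr h; omega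
      · have := h2.mpr h; omega
      · have := h1.mpr h; omega

def E (u v : List Char) : Prop :=
  u = v ∨ (∃ p a q, u = p ++ a :: q ∧ v = p ++ q) ∨ (∃ p a q, u = p ++ q ∧ v = p ++ a :: q) ∨
    (∃ p a b q, a ≠ b ∧ u = p ++ a :: q ∧ v = p ++ b :: q)

theorem E_cons_iff (c : Char) (s t : List Char) : E (c :: s) (c :: t) ↔ E s t := by
  constructor
  · rintro (h | ⟨p, a, q, hu, hv⟩ | ⟨p, a, q, hu, hv⟩ | ⟨p, a, b, q, hab, hu, hv⟩)
    · exact Or.inl (by simpa using h)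
    · cases p with
      | nil =>
        simp at hu hv
        exact Or.inr (Or.inl ⟨[], c, t, by simp [hu.2, ← hv], by simp⟩)
      | cons d p =>
        simp at hu hv
        exact Or.inr (Or.inl ⟨p, a, q, hu.2, hv.2⟩)
    · cases p with
      | nil =>
        simp at hu hv
        exact Or.inr (Or.inr (Or.inl ⟨[], c, s, by simp, by simp [hv.2, ← hu]⟩))
      | cons d p =>
        simp at hu hv
        exact Or.inr (Or.inr (Or.inl ⟨p, a, q, hu.2, hv.2⟩))
    · cases p with
      | nil =>
        simp at hu hv
        exact absurd (hu.1.symm.trans hv.1) hab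
      | cons d p =>
        simp at hu hv
        exact Or.inr (Or.inr (Or.inr ⟨p, a, b, q, hab, hu.2, hv.2⟩))
  · rintro (h | ⟨p, a, q, hu, hv⟩ | ⟨p, a, q, hu, hv⟩ | ⟨p, a, b, q, hab, hu, hv⟩)
    · exact Or.inl (by rw [h])
    · exact Or.inr (Or.inl ⟨c :: p, a, q, by simp [hu], by simp [hv]⟩)
    · exact Or.inr (Or.inr (Or.inl ⟨c :: p, a, q, by simp [hu], by simp [hv]⟩))
    · exact Or.inr (Or.inr (Or.inr ⟨c :: p, a, b, q, hab, by simp [hu], by simp [hv]⟩))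

theorem edLe1_iff_E (u v : List Char) : edLe1 u v = true ↔ E u v := by
  induction u, v using edLe1.induct with
  | case1 t =>
    simp only [edLe1, decide_eq_true_eq]
    constructor
    · intro h
      match t with
      | [] => exact Or.inl rfl
      | [b] => exact Or.inr (Or.inr (Or.inl ⟨[], b, [], rfl, rfl⟩))
      | b :: c :: t => simp at h
    · rintro (h | ⟨p, a, q, hu, hv⟩ | ⟨p, a, q, hu, hv⟩ | ⟨p, a, b, q, hab, hu, hv⟩)
      · simp [← h]
      · simp at hu
      · have : p = [] ∧ q = [] := by
          constructor <;> [cases p; cases q] <;> simp_all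
        simp [hv, this.1, this.2]
      · simp at hu
  | case2 a s =>
    simp only [edLe1, decide_eq_true_eq]
    constructor
    · intro h
      have hs : s = [] := by cases s <;> simp_all
      exact Or.inr (Or.inl ⟨[], a, [], by simp [hs], rfl⟩)
    · rintro (h | ⟨p, c, q, hu, hv⟩ | ⟨p, c, q, hu, hv⟩ | ⟨p, c, b, q, hab, hu, hv⟩)
      · simp at h
      · have hp : p = [] := by cases p with
          | nil => rfl
          | cons d p => simp at hv
        subst hp
        have hq : q = [] := by simpa using hv.symm
        subst hq
        rcases List.cons_eq_cons.mp hu with ⟨rfl, rfl⟩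
        simp
      · simp at hv
      · simp at hv
  | case3 s b t ih =>
    rw [show edLe1 (b :: s) (b :: t) = edLe1 s t by simp [edLe1], ih, E_cons_iff]
  | case4 a s b t hab =>
    rw [show edLe1 (a :: s) (b :: t) = ((s == t) || ((a :: s) == t) || (s == (b :: t))) by
      simp [edLe1, hab]]
    simp only [Bool.or_eq_true, beq_iff_eq]
    constructor
    · rintro ((h | h) | h)
      · exact Or.inr (Or.inr (Or.inr ⟨[], a, b, s, hab, rfl, by simp [h]⟩))
      · exact Or.inr (Or.inr (Or.inl ⟨[], b, a :: s, rfl, by simp [h]⟩))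
      · exact Or.inr (Or.inl ⟨[], a, b :: t, by simp [h], by simp⟩)
    · rintro (h | ⟨p, c, q, hu, hv⟩ | ⟨p, c, q, hu, hv⟩ | ⟨p, c, d, q, hcd, hu, hv⟩)
      · simp at h; exact absurd h.1 hab
      · cases p with
        | nil => simp at hu hv; exact Or.inr (by rw [hu.2, hv])
        | cons e p => simp at hu hv; exact absurd (hu.1.trans hv.1.symm) hab
      · cases p with
        | nil => simp at hu hv; exact Or.inl (Or.inr (by rw [hu, hv.2]))
        | cons e p => simp at hu hv; exact absurd (hu.1.trans hv.1.symm) hab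
      · cases p with
        | nil => simp at hu hv; exact Or.inl (Or.inl (hu.2.trans hv.2.symm))
        | cons e p => simp at hu hv; exact absurd (hu.1.trans hv.1.symm) hab

theorem E_rev (u v : List Char) (h : E u v) : E u.reverse v.reverse := by
  rcases h with h | ⟨p, a, q, hu, hv⟩ | ⟨p, a, q, hu, hv⟩ | ⟨p, a, b, q, hab, hu, hv⟩
  · exact Or.inl (by rw [h])
  · exact Or.inr (Or.inl ⟨q.reverse, a, p.reverse, by simp [hu], by simp [hv]⟩)
  · exact Or.inr (Or.inr (Or.inl ⟨q.reverse, a, p.reverse, by simp [hu], by simp [hv]⟩))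
  · exact Or.inr (Or.inr (Or.inr ⟨q.reverse, a, b, p.reverse, hab, by simp [hu], by simp [hv]⟩))

theorem E_symm (u v : List Char) (h : E u v) : E v u := by
  rcases h with h | ⟨p, a, q, hu, hv⟩ | ⟨p, a, q, hu, hv⟩ | ⟨p, a, b, q, hab, hu, hv⟩
  · exact Or.inl h.symm
  · exact Or.inr (Or.inr (Or.inl ⟨p, a, q, hv, hu⟩))
  · exact Or.inr (Or.inl ⟨p, a, q, hv, hu⟩)
  · exact Or.inr (Or.inr (Or.inr ⟨p, b, a, q, Ne.symm hab, hv, hu⟩))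

theorem edLe1_rev (u v : List Char) : edLe1 u.reverse v.reverse = edLe1 u v := by
  rw [Bool.eq_iff_iff, edLe1_iff_E, edLe1_iff_E]
  constructor
  · intro h
    have := E_rev _ _ h
    simpa using this
  · exact E_rev u v

theorem edLe1_comm (u v : List Char) : edLe1 u v = edLe1 v u := by
  rw [Bool.eq_iff_iff, edLe1_iff_E, edLe1_iff_E]
  exact ⟨E_symm u v, E_symm v u⟩

-- DP machinery
def pvRow (v p : List Char) : List Nat :=
  (List.range (v.length + 1)).map (fun j => levr p.reverse ((v.take j).reverse))

theorem pvRow_getD (v p : List Char) (j : Nat) (hj : j ≤ v.length) :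
    (pvRow v p).getD j 0 = levr p.reverse ((v.take j).reverse) := by
  rw [pvRow, List.getD_eq_getElem?_getD, List.getElem?_map, List.getElem?_range
    (by omega : j < v.length + 1)]
  rfl

theorem getD_map_range (n : Nat) (f : Nat → Nat) (j : Nat) (hj : j < n) :
    ((List.range n).map f).getD j 0 = f j := by
  rw [List.getD_eq_getElem?_getD, List.getElem?_map, List.getElem?_range hj]
  rfl


def pvInnerF (prevRow : List Nat) (c1 : Char) (curr : List Nat) (cj : Char × Nat) : List Nat :=
  curr ++ [min (prevRow.getD (cj.2 + 1) 0 + 1)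
    (min (curr.getD cj.2 0 + 1) (prevRow.getD cj.2 0 + (if c1 ≠ cj.1 then 1 else 0)))]

def pvOuterF (v : List Char) (prev : List Nat) (ci : Char × Nat) : List Nat :=
  v.zipIdx.foldl (pvInnerF prev ci.1) [ci.2 + 1]

theorem inner_spec (v : List Char) (c1 : Char) (p : List Char) :
    ∀ (w : List Char) (k : Nat), v.drop k = w → k ≤ v.length →
    ((w.zipIdx k).foldl (pvInnerF (pvRow v p) c1)
      ((List.range (k + 1)).map (fun j => levr (c1 :: p.reverse) ((v.take j).reverse))))
    = pvRow v (p ++ [c1]) := by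
  intro w k
  induction w generalizing k with
  | nil =>
    intro hdrop hk
    have hk' : k = v.length := by
      have := List.drop_eq_nil_iff.mp hdrop
      omega
    subst hk'
    simp only [List.zipIdx_nil, List.foldl_nil, pvRow, List.reverse_append, List.reverse_cons]
    rfl
  | cons c2 w ih =>
    intro hdrop hk
    have hklt : k < v.length := by
      by_contra hge
      rw [List.drop_eq_nil_of_le (by omega)] at hdrop
      simp at hdrop
    have hget : v[k]? = some c2 := by
      have h0 : (v.drop k)[0]? = v[k + 0]? := by rw [List.getElem?_drop]
      rw [hdrop] at h0
      simpa using h0.symm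
    have htake : v.take (k + 1) = v.take k ++ [c2] := by
      rw [List.take_add_one, hget]
      rfl
    have hdrop' : v.drop (k + 1) = w := by
      rw [← List.tail_drop, hdrop]
      rfl
    rw [List.zipIdx_cons, List.foldl_cons]
    have hstep :
        pvInnerF (pvRow v p) c1
          ((List.range (k + 1)).map (fun j => levr (c1 :: p.reverse) ((v.take j).reverse))) (c2, k)
        = (List.range (k + 1 + 1)).map (fun j => levr (c1 :: p.reverse) ((v.take j).reverse)) := by
      rw [pvInnerF, List.range_succ (n := k + 1), List.map_append]
      congr 1
      simp only [List.map_cons, List.map_nil]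
      congr 1
      rw [getD_map_range _ _ k (by omega), pvRow_getD v p (k + 1) (by omega),
        pvRow_getD v p k (by omega), htake, List.reverse_append]
      simp only [List.reverse_cons, List.reverse_nil, List.nil_append, List.singleton_append]
      rw [show levr (c1 :: p.reverse) (c2 :: (v.take k).reverse)
          = min (levr p.reverse (c2 :: (v.take k).reverse) + 1)
              (min (levr (c1 :: p.reverse) ((v.take k).reverse) + 1)
                (levr p.reverse ((v.take k).reverse) + (if c1 ≠ c2 then 1 else 0))) from by
        simp [levr]]
    rw [hstep]
    exact ih (k + 1) hdrop' (by omega)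

theorem outer_spec (v : List Char) :
    ∀ (w p : List Char),
    ((w.zipIdx p.length).foldl (pvOuterF v) (pvRow v p)) = pvRow v (p ++ w) := by
  intro w
  induction w with
  | nil => intro p; simp
  | cons c1 w ih =>
    intro p
    rw [List.zipIdx_cons, List.foldl_cons]
    have hfirst : pvOuterF v (pvRow v p) (c1, p.length) = pvRow v (p ++ [c1]) := by
      rw [pvOuterF]
      have hinit : [p.length + 1]
          = (List.range (0 + 1)).map (fun j => levr (c1 :: p.reverse) ((v.take j).reverse)) := by
        simp [levr]
      show v.zipIdx.foldl (pvInnerF (pvRow v p) c1) [p.length + 1] = _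
      rw [hinit]
      exact inner_spec v c1 p v 0 (by simp) (by omega)
    rw [hfirst]
    have := ih (p ++ [c1])
    simpa using this

theorem pyLev_dp (x y : List Char) (h1 : ¬ x.length < y.length) (h2 : y ≠ []) :
    pyLev x y = levr x.reverse y.reverse := by
  rw [pyLev, if_neg h1, if_neg (by simpa using h2)]
  show ((x.zipIdx.foldl (pvOuterF y) (List.range (y.length + 1))).getD
      ((x.zipIdx.foldl (pvOuterF y) (List.range (y.length + 1))).length - 1) 0) = _
  have hinit : List.range (y.length + 1) = pvRow y [] := by
    rw [pvRow]
    rw [List.map_congr_left (g := fun j => j)]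
    · simp
    · intro j hj
      simp only [List.mem_range] at hj
      simp [levr]
      omega
  rw [hinit]
  have h := outer_spec y x []
  simp only [List.length_nil, List.nil_append] at h
  rw [show x.zipIdx = x.zipIdx 0 from rfl, h]
  have hlen : (pvRow y x).length = y.length + 1 := by simp [pvRow]
  rw [hlen]
  simp only [Nat.add_sub_cancel]
  rw [pvRow_getD y x y.length (le_refl _)]
  rw [List.take_length]

theorem pyLev_le1 (x y : List Char) : decide (pyLev x y ≤ 1) = edLe1 x y := by
  by_cases hswap : x.length < y.length
  · rw [pyLev, if_pos hswap]
    rcases eq_or_ne x [] with rfl | hx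
    · rw [pyLev, if_neg (by simp)]
      cases y <;> simp [edLe1]
    · rw [pyLev_dp y x (by omega) hx, Bool.eq_iff_iff, decide_eq_true_eq, led,
        edLe1_rev, edLe1_comm]
  · rcases eq_or_ne y [] with rfl | hy
    · rw [pyLev, if_neg hswap]
      cases x <;> simp [edLe1]
    · rw [pyLev_dp x y hswap hy, Bool.eq_iff_iff, decide_eq_true_eq, led, edLe1_rev]

theorem edLe1_refl (u : List Char) : edLe1 u u = true := by
  rw [← led]
  simp [(levr_eq_zero u u).mpr rfl]

theorem inner_eq (token normalized : String) (terms : List String) :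
    (terms.any (fun term =>
      let tl := PySem.Str.lower term
      if token = tl then false
      else if normalized = tl then true
      else decide (pyLev normalized.toList tl.toList ≤ 1)))
    = (terms.map (fun term => PySem.Str.lower term)).any
        (fun tl => !(token == tl) && edLe1 normalized.toList tl.toList) := by
  rw [List.any_map]
  refine List.any_congr rfl ?_
  intro term
  simp only [Function.comp]
  by_cases h1 : token = PySem.Str.lower term
  · simp [h1]
  · by_cases h2 : normalized = PySem.Str.lower term
    · have h1' : (token == PySem.Str.lower term) = false := by simp [h1]
      have h2' : normalized.toList = (PySem.Str.lower term).toList := by rw [h2]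
      simp only [h1', if_neg h1, if_pos h2, Bool.not_false, Bool.true_and, ← h2', edLe1_refl]
    · simp [h1, h2, pyLev_le1]

-- ===== VERDICT (by name: the statement is the Claim_ definition above) =====
theorem is_visual_homograph_of_terms_spec : Claim_equal_is_visual_homograph_of_terms := by
  intro domain terms _
  unfold Spec_is_visual_homograph_of_terms is_visual_homograph_of_terms
    is_visual_homograph_of_terms_alt getDomainTokens getDomainBase normalizeVisual
  rw [List.any_filter]
  refine List.any_congr rfl ?_
  intro token
  by_cases h : token = ""
  · simp [h]
  · have hbe : (token == "") = false := by simp [h]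
    simp only [hbe, Bool.not_false, Bool.true_and, if_false, Bool.false_eq_true]
    exact inner_eq token _ terms
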